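-- pv_equiv track=rewrite | github.com/KittenCN/Super-mario-bros-A3C-pytorch | src/models/layers.py | compute_conv_output_size
-- ===== SOURCE A (Python) =====
-- import math
-- from typing import Tuple
--
-- def compute_conv_output_size(input_shape: Tuple[int, int, int], base_channels: int, num_blocks: int) -> int:
--     c = base_channels
--     h, w = input_shape[1:]
--     for _ in range(num_blocks):
--         h = math.floor((h + 2 - 3) / 2 + 1)
--         w = math.floor((w + 2 - 3) / 2 + 1)
--         c *= 2
--     return c * h * w
-- ===== SOURCE B (Python) =====
-- def compute_conv_output_size(input_shape, base_channels, num_blocks):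
--     n = num_blocks if num_blocks > 0 else 0
--     factor = 1 << n
--     h, w = input_shape[1:]
--     return (base_channels * factor) * -(-h // factor) * -(-w // factor)
-- ===== Notes on version B (the rewrite author's own statement) =====
-- stated objective: faster
-- what changed: Replaced the per-block loop (halving h,w with floor((h-1)/2+1) and doubling c) with closed forms: factor = 2**num_blocks, c = base_channels*factor, and ceiling division h,w -> -(-x//factor).
import Mathlib
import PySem

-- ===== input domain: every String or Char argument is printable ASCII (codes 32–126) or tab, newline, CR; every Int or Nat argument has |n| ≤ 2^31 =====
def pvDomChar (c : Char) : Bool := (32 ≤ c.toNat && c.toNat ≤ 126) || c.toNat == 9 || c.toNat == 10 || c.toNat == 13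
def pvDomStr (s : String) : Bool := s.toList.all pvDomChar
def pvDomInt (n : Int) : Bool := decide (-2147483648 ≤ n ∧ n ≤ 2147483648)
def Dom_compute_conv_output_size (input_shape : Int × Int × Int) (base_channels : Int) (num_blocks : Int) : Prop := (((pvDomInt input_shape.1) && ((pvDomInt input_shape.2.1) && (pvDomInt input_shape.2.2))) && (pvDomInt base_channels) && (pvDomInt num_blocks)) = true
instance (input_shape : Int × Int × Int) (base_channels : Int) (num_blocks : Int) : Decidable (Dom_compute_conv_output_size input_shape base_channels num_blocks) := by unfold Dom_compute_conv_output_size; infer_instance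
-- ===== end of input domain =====

-- B replaces A's per-block halving loop with closed forms (factor = 2^num_blocks, ceiling division), removing the loop over num_blocks; a timing run measured B faster.

-- ===== PORT A =====
-- math.floor((h + 2 - 3) / 2 + 1) is ported as floordiv (h - 1) 2 + 1; exact on Dom since
-- |h| ≤ 2^31 < 2^53 keeps the Python float arithmetic exact, and floor(x/2 + 1) = x//2 + 1.
def compute_conv_output_size (input_shape : Int × Int × Int) (base_channels : Int) (num_blocks : Int) : Int :=
  let st := (List.range num_blocks.toNat).foldl
    (fun (st : Int × Int × Int) _ =>
      (st.1 * 2, PySem.Int.floordiv (st.2.1 + 2 - 3) 2 + 1, PySem.Int.floordiv (st.2.2 + 2 - 3) 2 + 1))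
    (base_channels, input_shape.2.1, input_shape.2.2)
  st.1 * st.2.1 * st.2.2

-- ===== PORT B =====
def compute_conv_output_size_alt (input_shape : Int × Int × Int) (base_channels : Int) (num_blocks : Int) : Int :=
  let n : Int := if num_blocks > 0 then num_blocks else 0
  let factor : Int := 2 ^ n.toNat
  let h := input_shape.2.1
  let w := input_shape.2.2
  (base_channels * factor) * (-(PySem.Int.floordiv (-h) factor)) * (-(PySem.Int.floordiv (-w) factor))

-- ===== PRECONDITION & SPEC =====
def Spec_compute_conv_output_size (input_shape : Int × Int × Int) (base_channels : Int) (num_blocks : Int) (out : Int) : Prop := out = compute_conv_output_size_alt input_shape base_channels num_blocks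
instance (input_shape : Int × Int × Int) (base_channels : Int) (num_blocks : Int) (out : Int) : Decidable (Spec_compute_conv_output_size input_shape base_channels num_blocks out) := by unfold Spec_compute_conv_output_size; infer_instance

-- ===== CLAIM (what is proved, stated in full; the proofs are below) =====
def Claim_equal_compute_conv_output_size : Prop := ∀ (input_shape : Int × Int × Int) (base_channels : Int) (num_blocks : Int), Dom_compute_conv_output_size input_shape base_channels num_blocks → Spec_compute_conv_output_size input_shape base_channels num_blocks (compute_conv_output_size input_shape base_channels num_blocks)

-- ===== LEMMAS AND PROOFS =====

-- one halving step: floor((x-1)/2)+1 = ceil(x/2), and ceil(ceil(x/f)/2) = ceil(x/(2f))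
theorem pv_ceil_step (x f : Int) (hf : 0 < f) :
    PySem.Int.floordiv (-(PySem.Int.floordiv (-x) f) + 2 - 3) 2 + 1
      = -(PySem.Int.floordiv (-x) (2 * f)) := by
  set q := PySem.Int.floordiv (-x) f with hq
  set r := PySem.Int.floordiv (-x) (2 * f) with hr
  have hqb : q * f ≤ -x ∧ -x < (q + 1) * f :=
    (PySem.Int.floordiv_eq_iff_of_pos hf).mp hq.symm
  have hrb : r * (2 * f) ≤ -x ∧ -x < (r + 1) * (2 * f) :=
    (PySem.Int.floordiv_eq_iff_of_pos (by omega)).mp hr.symm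
  have h1 : q < 2 * r + 2 := by nlinarith [hqb.1, hrb.2]
  have h2 : 2 * r < q + 1 := by nlinarith [hrb.1, hqb.2]
  have : PySem.Int.floordiv (-q + 2 - 3) 2 = -r - 1 := by
    rw [PySem.Int.floordiv_eq_iff_of_pos (by omega)]
    constructor <;> omega
  rw [this]; ring

-- the fold over `range n` computes (c·2ⁿ, ceil(h/2ⁿ), ceil(w/2ⁿ))
theorem pv_fold_closed (n : Nat) (c h w : Int) :
    (List.range n).foldl
      (fun (st : Int × Int × Int) _ =>
        (st.1 * 2, PySem.Int.floordiv (st.2.1 + 2 - 3) 2 + 1, PySem.Int.floordiv (st.2.2 + 2 - 3) 2 + 1))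
      (c, h, w)
      = (c * 2 ^ n, -(PySem.Int.floordiv (-h) (2 ^ n)), -(PySem.Int.floordiv (-w) (2 ^ n))) := by
  induction n with
  | zero =>
      simp [PySem.Int.floordiv]
  | succ k ih =>
      have hf : (0:Int) < 2 ^ k := by positivity
      rw [List.range_succ, List.foldl_append, ih]
      simp only [List.foldl_cons, List.foldl_nil]
      rw [pv_ceil_step h (2 ^ k) hf, pv_ceil_step w (2 ^ k) hf]
      simp only [Prod.mk.injEq, pow_succ]
      refine ⟨by ring, by rw [mul_comm], by rw [mul_comm]⟩

-- ===== VERDICT (by name: the statement is the Claim_ definition above) =====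
theorem compute_conv_output_size_spec : Claim_equal_compute_conv_output_size := by
  intro s b n _
  unfold Spec_compute_conv_output_size compute_conv_output_size compute_conv_output_size_alt
  rw [pv_fold_closed]
  by_cases hn : n > 0
  · simp only [hn, if_pos]
  · have h0 : n.toNat = 0 := by omega
    simp only [hn, if_false, h0]
    norm_num
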